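-- pv_equiv track=rewrite | github.com/lrobidou/findere | src/drafts/analyseSubK.py | reconstituer
-- ===== SOURCE A (Python) =====
-- def reconstituer(liste_pos_stretch, maxlen):
--     reconstit = []
--     debut = 0
--     for pos_stretch, fin_stretch in liste_pos_stretch:
--         if pos_stretch is not None:
--             reconstit += [0 for _ in range(pos_stretch - debut)]
--             if fin_stretch != maxlen:
--                 reconstit += [1 for _ in range(fin_stretch - pos_stretch)]
--             else:
--                 reconstit += [1 for _ in range(maxlen - pos_stretch)]
--         else:
--             reconstit += [0 for _ in range(maxlen - debut)]
--         debut = fin_stretch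
--     return reconstit
-- ===== SOURCE B (Python) =====
-- def reconstituer(liste_pos_stretch, maxlen):
--     # phase 1: absolute [a, b) coordinates of the 1-intervals in the output
--     ones = []
--     off = 0
--     debut = 0
--     for pos_stretch, fin_stretch in liste_pos_stretch:
--         if pos_stretch is not None:
--             off += max(pos_stretch - debut, 0)
--             n1 = max(fin_stretch - pos_stretch, 0)
--             ones.append((off, off + n1))
--             off += n1
--         else:
--             off += max(maxlen - debut, 0)
--         debut = fin_stretch
--     # phase 2: paint the 1-intervals onto a zero canvas by slice assignment
--     out = [0] * off
--     for a, b in ones: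
--         out[a:b] = [1] * (b - a)
--     return out
-- ===== Notes on version B (the rewrite author's own statement) =====
-- stated objective: alternative
-- what changed: B never emits runs while scanning: a first pass only computes the absolute [a,b) coordinates of the 1-intervals in output space, then B allocates a zero canvas of the final length and paints each interval onto it by slice assignment, instead of A's cursor-driven sequential emission of 0/1 runs; the canvas is built by one bulk [0]*off allocation rather than repeated list appends.
import Mathlib
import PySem

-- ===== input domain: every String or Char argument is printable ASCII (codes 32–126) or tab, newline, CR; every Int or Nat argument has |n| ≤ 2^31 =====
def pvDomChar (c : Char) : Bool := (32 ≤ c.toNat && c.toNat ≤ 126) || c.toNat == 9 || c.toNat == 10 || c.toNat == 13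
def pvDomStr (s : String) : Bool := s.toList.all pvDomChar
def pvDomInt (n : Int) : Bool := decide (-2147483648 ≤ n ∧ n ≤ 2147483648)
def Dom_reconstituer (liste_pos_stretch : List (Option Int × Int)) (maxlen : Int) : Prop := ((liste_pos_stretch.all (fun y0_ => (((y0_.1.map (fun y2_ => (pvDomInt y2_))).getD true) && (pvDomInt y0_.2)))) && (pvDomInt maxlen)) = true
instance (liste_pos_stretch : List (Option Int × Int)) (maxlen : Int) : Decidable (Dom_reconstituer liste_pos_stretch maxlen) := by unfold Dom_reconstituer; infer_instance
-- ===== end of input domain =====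

-- B first computes the absolute output coordinates of the 1-intervals, then paints
-- them onto a zero canvas by slice assignment (alternative algorithm, similar cost).

-- ===== PORT A =====
-- 'reconstit += [0 for _ in range(k)]': range of a non-positive bound is empty; Int.toNat clamps likewise
def pvGoA (maxlen : Int) : List (Option Int × Int) → List Int → Int → List Int
  | [], acc, _ => acc
  | (pos?, fin) :: rest, acc, debut =>
    match pos? with
    | some pos =>
        pvGoA maxlen rest
          (acc ++ List.replicate (pos - debut).toNat 0 ++
            (if fin ≠ maxlen then List.replicate (fin - pos).toNat 1
             else List.replicate (maxlen - pos).toNat 1)) fin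
    | none => pvGoA maxlen rest (acc ++ List.replicate (maxlen - debut).toNat 0) fin

def reconstituer (liste_pos_stretch : List (Option Int × Int)) (maxlen : Int) : List Int :=
  pvGoA maxlen liste_pos_stretch [] 0

-- ===== PORT B =====
-- phase 1 of Source B: scan, returning (ones intervals, total output length off)
def pvScan (maxlen : Int) : List (Option Int × Int) → List (Int × Int) → Int → Int → (List (Int × Int) × Int)
  | [], ones, _, off => (ones, off)
  | (pos?, fin) :: rest, ones, debut, off =>
    match pos? with
    | some pos =>
        let o1 := off + max (pos - debut) 0
        let n1 := max (fin - pos) 0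
        pvScan maxlen rest (ones ++ [(o1, o1 + n1)]) fin (o1 + n1)
    | none => pvScan maxlen rest ones fin (off + max (maxlen - debut) 0)

-- phase 2 of Source B: out = [0]*off; for a, b in ones: out[a:b] = [1]*(b-a)
-- slice assignment with 0 ≤ a ≤ b ≤ len(out) (always the case here) is take/replicate/drop
def pvSplice (canvas : List Int) (a b : Int) : List Int :=
  canvas.take a.toNat ++ List.replicate (b - a).toNat 1 ++ canvas.drop b.toNat

def reconstituer_alt (liste_pos_stretch : List (Option Int × Int)) (maxlen : Int) : List Int :=
  let s := pvScan maxlen liste_pos_stretch [] 0 0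
  s.1.foldl (fun canvas p => pvSplice canvas p.1 p.2) (List.replicate s.2.toNat 0)

-- ===== PRECONDITION & SPEC =====
def Spec_reconstituer (liste_pos_stretch : List (Option Int × Int)) (maxlen : Int) (out : List Int) : Prop := out = reconstituer_alt liste_pos_stretch maxlen
instance (liste_pos_stretch : List (Option Int × Int)) (maxlen : Int) (out : List Int) : Decidable (Spec_reconstituer liste_pos_stretch maxlen out) := by unfold Spec_reconstituer; infer_instance

-- ===== CLAIM (what is proved, stated in full; the proofs are below) =====
def Claim_equal_reconstituer : Prop := ∀ (liste_pos_stretch : List (Option Int × Int)) (maxlen : Int), Dom_reconstituer liste_pos_stretch maxlen → Spec_reconstituer liste_pos_stretch maxlen (reconstituer liste_pos_stretch maxlen)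

-- ===== LEMMAS AND PROOFS =====

-- run expansion of an interval list between offsets o and L
def pvExpand : List (Int × Int) → Int → Int → List Int
  | [], o, L => List.replicate (L - o).toNat 0
  | (a, b) :: r, o, L =>
      List.replicate (a - o).toNat 0 ++ List.replicate (b - a).toNat 1 ++ pvExpand r b L

-- well-formed consecutive interval chain in [o, L]
def pvC : Int → List (Int × Int) → Int → Prop
  | o, [], L => o ≤ L
  | o, (a, b) :: r, L => o ≤ a ∧ a ≤ b ∧ pvC b r L

theorem pvC_mono (iv : List (Int × Int)) (o m L : Int) (h : o ≤ m) (hc : pvC m iv L) :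
    pvC o iv L := by
  cases iv with
  | nil => simp only [pvC] at *; omega
  | cons hd tl =>
    obtain ⟨a, b⟩ := hd
    obtain ⟨ha, hb, hcc⟩ := hc
    exact ⟨by omega, hb, hcc⟩

theorem pvC_bounds : ∀ (iv : List (Int × Int)) (o L : Int), pvC o iv L →
    o ≤ L ∧ ∀ p ∈ iv, o ≤ p.1 ∧ p.1 ≤ p.2 ∧ p.2 ≤ L := by
  intro iv
  induction iv with
  | nil => intro o L h; exact ⟨h, by simp⟩
  | cons hd tl ih =>
    intro o L h
    obtain ⟨a, b⟩ := hd
    obtain ⟨h1, h2, h3⟩ := h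
    obtain ⟨hbL, hall⟩ := ih b L h3
    refine ⟨by omega, ?_⟩
    intro p hp
    rcases List.mem_cons.mp hp with rfl | hp
    · exact ⟨h1, h2, hbL⟩
    · have := hall p hp; exact ⟨by omega, this.2.1, this.2.2⟩

theorem pvScan_acc (maxlen : Int) (l : List (Option Int × Int)) :
    ∀ (ones : List (Int × Int)) (d o : Int),
      pvScan maxlen l ones d o =
        (ones ++ (pvScan maxlen l [] d o).1, (pvScan maxlen l [] d o).2) := by
  induction l with
  | nil => intro ones d o; simp [pvScan]
  | cons h t ih =>
    intro ones d o
    obtain ⟨pos?, fin⟩ := h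
    cases pos? with
    | none => simp only [pvScan]; rw [ih]
    | some pos =>
      simp only [pvScan]
      rw [ih (ones ++ _), ih ([] ++ _)]
      simp

-- the scan produces a well-formed chain
theorem pvScan_C (maxlen : Int) (l : List (Option Int × Int)) :
    ∀ (d o : Int), pvC o (pvScan maxlen l [] d o).1 (pvScan maxlen l [] d o).2 := by
  induction l with
  | nil => intro d o; simp [pvScan, pvC]
  | cons h t ih =>
    intro d o
    obtain ⟨pos?, fin⟩ := h
    cases pos? with
    | none =>
      simp only [pvScan]
      exact pvC_mono _ _ _ _ (by omega) (ih fin (o + max (maxlen - d) 0))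
    | some pos =>
      simp only [pvScan, List.nil_append]
      rw [pvScan_acc maxlen t [(o + max (pos - d) 0, o + max (pos - d) 0 + max (fin - pos) 0)]]
      simp only [List.singleton_append]
      exact ⟨by omega, by omega, ih fin (o + max (pos - d) 0 + max (fin - pos) 0)⟩

-- prepend zeros to an expansion starting later
theorem pvExpand_shift (iv : List (Int × Int)) (o m L : Int)
    (hom : o ≤ m) (hc : pvC m iv L) :
    pvExpand iv o L = List.replicate (m - o).toNat 0 ++ pvExpand iv m L := by
  cases iv with
  | nil =>
    simp only [pvExpand, pvC] at *
    rw [show (L - o).toNat = (m - o).toNat + (L - m).toNat by omega, List.replicate_add]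
  | cons hd tl =>
    obtain ⟨a, b⟩ := hd
    obtain ⟨h1, h2, h3⟩ := hc
    simp only [pvExpand]
    rw [show (a - o).toNat = (m - o).toNat + (a - m).toNat by omega, List.replicate_add]
    simp only [List.append_assoc]

-- the A-side recursion expands the scanned intervals
theorem pvGoA_expand (maxlen : Int) (l : List (Option Int × Int)) :
    ∀ (acc : List Int) (d o : Int),
      pvGoA maxlen l acc d =
        acc ++ pvExpand (pvScan maxlen l [] d o).1 o (pvScan maxlen l [] d o).2 := by
  induction l with
  | nil => intro acc d o; simp [pvGoA, pvScan, pvExpand]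
  | cons h t ih =>
    intro acc d o
    obtain ⟨pos?, fin⟩ := h
    cases pos? with
    | none =>
      simp only [pvGoA, pvScan]
      rw [ih _ fin (o + max (maxlen - d) 0)]
      rw [pvExpand_shift _ o (o + max (maxlen - d) 0) _ (by omega)
            (pvScan_C maxlen t fin (o + max (maxlen - d) 0))]
      rw [show (o + max (maxlen - d) 0 - o).toNat = (maxlen - d).toNat by omega]
      simp [List.append_assoc]
    | some pos =>
      simp only [pvGoA, pvScan, List.nil_append]
      rw [pvScan_acc maxlen t [(o + max (pos - d) 0, o + max (pos - d) 0 + max (fin - pos) 0)]]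
      simp only [List.singleton_append]
      rw [ih _ fin (o + max (pos - d) 0 + max (fin - pos) 0)]
      simp only [pvExpand]
      rw [show (o + max (pos - d) 0 - o).toNat = (pos - d).toNat by omega]
      rw [show (o + max (pos - d) 0 + max (fin - pos) 0 - (o + max (pos - d) 0)).toNat
            = (fin - pos).toNat by omega]
      by_cases hfm : fin = maxlen
      · subst hfm; simp [List.append_assoc]
      · simp [hfm, List.append_assoc]

-- painting the intervals of a well-formed chain onto a zero canvas equals expanding it
theorem pvFold_eq : ∀ (iv : List (Int × Int)) (done : List Int) (o L : Int),
    (done.length : Int) = o → pvC o iv L →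
    iv.foldl (fun c p => pvSplice c p.1 p.2) (done ++ List.replicate (L - o).toNat 0)
      = done ++ pvExpand iv o L := by
  intro iv
  induction iv with
  | nil => intro done o L _ _; simp [pvExpand]
  | cons hd tl ih =>
    intro done o L hlen hc
    obtain ⟨a, b⟩ := hd
    obtain ⟨h1, h2, h3⟩ := hc
    obtain ⟨hbL, -⟩ := pvC_bounds tl b L h3
    have ho : 0 ≤ o := by omega
    simp only [List.foldl_cons]
    have hsplice :
        pvSplice (done ++ List.replicate (L - o).toNat 0) a b
          = (done ++ List.replicate (a - o).toNat 0 ++ List.replicate (b - a).toNat 1)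
              ++ List.replicate (L - b).toNat 0 := by
      unfold pvSplice
      have hta : a.toNat = done.length + (a - o).toNat := by omega
      have htb : b.toNat = done.length + (b - o).toNat := by omega
      rw [hta, htb, List.take_append, List.drop_append, List.take_replicate,
          List.drop_replicate, List.take_of_length_le (by omega),
          List.drop_of_length_le (by omega)]
      rw [show min (done.length + (a - o).toNat - done.length) (L - o).toNat
            = (a - o).toNat by omega,
          show (L - o).toNat - (done.length + (b - o).toNat - done.length)
            = (L - b).toNat by omega]
      simp [List.append_assoc]
    rw [hsplice, ih (done ++ List.replicate (a - o).toNat 0 ++ List.replicate (b - a).toNat 1)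
          b L (by simp; omega) h3]
    simp [pvExpand, List.append_assoc]

-- ===== VERDICT (by name: the statement is the Claim_ definition above) =====
theorem reconstituer_spec : Claim_equal_reconstituer := by
  intro l maxlen _
  unfold Spec_reconstituer reconstituer reconstituer_alt
  rw [pvGoA_expand maxlen l [] 0 0, List.nil_append]
  have := pvFold_eq (pvScan maxlen l [] 0 0).1 [] 0 (pvScan maxlen l [] 0 0).2
    (by simp) (pvScan_C maxlen l 0 0)
  simp only [List.nil_append, Int.sub_zero] at this
  exact this.symm
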